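-- pv_equiv track=rewrite | github.com/tarungattu/JobShopGA | JobShopGAimpl.py | create_operation_data
-- ===== SOURCE A (Python) =====
-- m = 4
--
-- machine_data = [0,1,2,3, 1,0,3,2, 0,1,3,2]
--
-- ptime_data = [10,8,4,0, 4,3,5,6, 4,7,3,0]
--
-- def create_operation_data(machine_data, ptime_data, m):
--     matrix = []
--     sublist = []
--     for i in range(len(machine_data)):
--         sublist.append([machine_data[i], ptime_data[i]])
--         if (i + 1) % m == 0:
--             matrix.append(sublist)
--             sublist = []
--     # Check if there are remaining elements
--     if sublist:
--         matrix.append(sublist)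
--     return matrix
-- ===== SOURCE B (Python) =====
-- def create_operation_data(machine_data, ptime_data, m):
--     pairs = [[machine_data[i], ptime_data[i]] for i in range(len(machine_data))]
--     return [pairs[i:i + m] for i in range(0, len(pairs), m)]
-- ===== Notes on version B (the rewrite author's own statement) =====
-- stated objective: alternative
-- what changed: Replaces the streaming accumulator with modulo-flush and tail-flush by building the full pair list once and partitioning it with index-range slices; Pre_ excludes non-positive m, where A either raises ZeroDivisionError or (for negative m) chunks by |m| only as an accident of Python's floored modulo.
-- outside the precondition, e.g. on create_operation_data([], [], 0): A returns [], B raises ValueError; on create_operation_data([1, 2], [3, 4], -2): A returns [[[1, 3], [2, 4]]], B returns []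
import Mathlib
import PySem

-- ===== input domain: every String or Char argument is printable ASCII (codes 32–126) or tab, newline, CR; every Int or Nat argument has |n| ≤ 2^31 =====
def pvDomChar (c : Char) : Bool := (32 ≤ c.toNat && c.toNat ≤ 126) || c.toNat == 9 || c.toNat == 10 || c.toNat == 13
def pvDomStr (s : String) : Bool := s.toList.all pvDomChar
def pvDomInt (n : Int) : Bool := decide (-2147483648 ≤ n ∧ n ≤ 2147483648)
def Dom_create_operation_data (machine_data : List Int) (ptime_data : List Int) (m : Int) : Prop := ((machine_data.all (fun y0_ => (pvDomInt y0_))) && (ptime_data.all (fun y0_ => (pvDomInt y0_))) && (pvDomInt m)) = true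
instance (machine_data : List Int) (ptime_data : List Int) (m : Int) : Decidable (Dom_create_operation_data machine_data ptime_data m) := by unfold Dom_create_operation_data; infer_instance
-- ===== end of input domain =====

-- B builds the list of [machine, ptime] pairs once and partitions it with index-range
-- slices, instead of A's streaming accumulator with modulo-flush and tail-flush.

-- ===== PORT A =====
def create_operation_data (machine_data : List Int) (ptime_data : List Int) (m : Int) : List (List (List Int)) :=
  let r := (PySem.List.pyRange 0 (machine_data.length : Int) 1).foldl
    (fun st i =>
      let sub := st.2 ++ [[PySem.List.pyGetD machine_data i 0, PySem.List.pyGetD ptime_data i 0]]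
      if PySem.Int.mod (i + 1) m = 0 then (st.1 ++ [sub], ([] : List (List Int))) else (st.1, sub))
    (([] : List (List (List Int))), ([] : List (List Int)))
  if r.2 = [] then r.1 else r.1 ++ [r.2]

-- ===== PORT B =====
def create_operation_data_alt (machine_data : List Int) (ptime_data : List Int) (m : Int) : List (List (List Int)) :=
  let pairs := (PySem.List.pyRange 0 (machine_data.length : Int) 1).map
    (fun i => [PySem.List.pyGetD machine_data i 0, PySem.List.pyGetD ptime_data i 0])
  (PySem.List.pyRange 0 (pairs.length : Int) m).map (fun i => PySem.List.slice pairs (some i) (some (i + m)))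

-- ===== PRECONDITION & SPEC =====
-- Pre_ excludes (a) ptime_data shorter than machine_data, where A raises IndexError, and
-- (b) non-positive m: at m = 0 A raises ZeroDivisionError on nonempty machine_data (its []
-- on empty input is only the loop never running, B raises ValueError there), and for
-- negative m A's chunking by |m| is an accident of Python's floored modulo on a corner no
-- one would specify; B returns [] there.
def Pre_create_operation_data (machine_data : List Int) (ptime_data : List Int) (m : Int) : Prop :=
  machine_data.length ≤ ptime_data.length ∧ 1 ≤ m
instance (machine_data : List Int) (ptime_data : List Int) (m : Int) : Decidable (Pre_create_operation_data machine_data ptime_data m) := by unfold Pre_create_operation_data; infer_instance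

def pvWitness_create_operation_data : List Int × List Int × Int := ([0, 1, 2, 3, 1], [10, 8, 4, 0, 4], 2)

def Spec_create_operation_data (machine_data : List Int) (ptime_data : List Int) (m : Int) (out : List (List (List Int))) : Prop := out = create_operation_data_alt machine_data ptime_data m
instance (machine_data : List Int) (ptime_data : List Int) (m : Int) (out : List (List (List Int))) : Decidable (Spec_create_operation_data machine_data ptime_data m out) := by unfold Spec_create_operation_data; infer_instance

-- ===== CLAIM (what is proved, stated in full; the proofs are below) =====
def Claim_equal_create_operation_data : Prop := ∀ (machine_data : List Int) (ptime_data : List Int) (m : Int), Dom_create_operation_data machine_data ptime_data m → Pre_create_operation_data machine_data ptime_data m → Spec_create_operation_data machine_data ptime_data m (create_operation_data machine_data ptime_data m)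

-- ===== LEMMAS AND PROOFS =====

def pvLoopA (m : Int) : List (List Int) → Int → (List (List (List Int)) × List (List Int)) → List (List (List Int)) × List (List Int)
  | [], _, st => st
  | p :: ps, i, st =>
      pvLoopA m ps (i + 1)
        (let sub := st.2 ++ [p];
         if PySem.Int.mod (i + 1) m = 0 then (st.1 ++ [sub], []) else (st.1, sub))

theorem pvFoldl_eq_loopA (m : Int) (g : Int → List Int) :
    ∀ (d a : Nat) (st : List (List (List Int)) × List (List Int)),
      ((PySem.List.pyRange (a : Int) ((a + d : Nat) : Int) 1).foldl
        (fun st i =>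
          let sub := st.2 ++ [g i]
          if PySem.Int.mod (i + 1) m = 0 then (st.1 ++ [sub], ([] : List (List Int))) else (st.1, sub)) st)
      = pvLoopA m ((PySem.List.pyRange (a : Int) ((a + d : Nat) : Int) 1).map g) (a : Int) st := by
  intro d
  induction d with
  | zero =>
    intro a st
    rw [PySem.List.pyRange_one_eq_nil (by simp)]
    simp [pvLoopA]
  | succ d ih =>
    intro a st
    rw [PySem.List.pyRange_one_cons (by push_cast; omega)]
    have ha : (a : Int) + 1 = ((a + 1 : Nat) : Int) := by push_cast; ring
    have hb : ((a + (d + 1) : Nat) : Int) = (((a + 1) + d : Nat) : Int) := by push_cast; ring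
    simp only [List.foldl_cons, List.map_cons, pvLoopA, ha, hb]
    exact ih (a + 1) _

def pvGo (k : Nat) : List (List Int) → List (List Int) → List (List (List Int))
  | sub, [] => if sub = [] then [] else [sub]
  | sub, p :: ps => if sub.length + 1 = k then (sub ++ [p]) :: pvGo k [] ps else pvGo k (sub ++ [p]) ps

def pvChunks (j : Nat) : List (List Int) → List (List (List Int))
  | [] => []
  | a :: t => (a :: t.take j) :: pvChunks j (t.drop j)
  termination_by L => L.length
  decreasing_by simp

theorem pvLoopA_eq_go (m : Int) (hm : m ≠ 0) :
    ∀ (ps : List (List Int)) (i : Int) (mat : List (List (List Int))) (sub : List (List Int)),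
      sub.length < m.natAbs → ((m.natAbs : Int) ∣ i - sub.length) →
      (let r := pvLoopA m ps i (mat, sub); if r.2 = [] then r.1 else r.1 ++ [r.2])
        = mat ++ pvGo m.natAbs sub ps := by
  intro ps
  induction ps with
  | nil =>
    intro i mat sub _ _
    simp only [pvLoopA, pvGo]
    by_cases h : sub = [] <;> simp [h]
  | cons p ps ih =>
    intro i mat sub hlen hdvd
    have hcond : (PySem.Int.mod (i + 1) m = 0) ↔ (sub.length + 1 = m.natAbs) := by
      rw [PySem.Int.mod_eq_zero_iff_dvd, ← Int.natAbs_dvd]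
      constructor
      · intro h
        have h2 : (m.natAbs : Int) ∣ ((sub.length : Int) + 1) := by
          have : (sub.length : Int) + 1 = (i + 1) - (i - sub.length) := by ring
          rw [this]; exact dvd_sub h hdvd
        have := Int.le_of_dvd (by positivity) h2
        omega
      · intro h
        have he : ((sub.length : Int) + 1) = (m.natAbs : Int) := by exact_mod_cast h
        have : i + 1 = (i - sub.length) + ((sub.length : Int) + 1) := by ring
        rw [this]
        exact dvd_add hdvd (he ▸ dvd_refl _)
    simp only [pvLoopA, pvGo]
    by_cases h : sub.length + 1 = m.natAbs
    · have he : ((sub.length : Int) + 1) = (m.natAbs : Int) := by exact_mod_cast h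
      have hd1 : (m.natAbs : Int) ∣ (i + 1) := by
        have hi : i + 1 = (i - sub.length) + ((sub.length : Int) + 1) := by ring
        rw [hi]; exact dvd_add hdvd (he ▸ dvd_refl _)
      rw [if_pos (hcond.mpr h), if_pos h]
      rw [ih (i+1) (mat ++ [sub ++ [p]]) [] (by simpa using Int.natAbs_pos.mpr hm) (by simpa using hd1)]
      simp
    · rw [if_neg (fun hc => h (hcond.mp hc)), if_neg h]
      rw [ih (i+1) mat (sub ++ [p])
        (by simp only [List.length_append, List.length_cons, List.length_nil]; omega)
        (by simp only [List.length_append, List.length_cons, List.length_nil]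
            convert hdvd using 1; push_cast; ring)]

theorem pvGo_block (j : Nat) :
    ∀ (L sub : List (List Int)), sub.length ≤ j → (sub ≠ [] ∨ L ≠ []) →
      pvGo (j + 1) sub L
        = (sub ++ L.take (j + 1 - sub.length)) :: pvGo (j + 1) [] (L.drop (j + 1 - sub.length)) := by
  intro L
  induction L with
  | nil =>
    intro sub hlen hne
    have hs : sub ≠ [] := by tauto
    simp [pvGo, hs]
  | cons p ps ih =>
    intro sub hlen _
    simp only [pvGo]
    by_cases h : sub.length + 1 = j + 1
    · rw [if_pos h]
      have : j + 1 - sub.length = 1 := by omega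
      simp [this]
    · rw [if_neg h]
      rw [ih (sub ++ [p])
        (by simp only [List.length_append, List.length_cons, List.length_nil]; omega)
        (by exact Or.inl (by simp))]
      have h2 : j + 1 - sub.length = (j - sub.length) + 1 := by omega
      simp [h2]

theorem pvGo_eq_chunks (j : Nat) (L : List (List Int)) : pvGo (j + 1) [] L = pvChunks j L := by
  induction h : L.length using Nat.strong_induction_on generalizing L with
  | _ n ih =>
    cases L with
    | nil => simp [pvGo, pvChunks]
    | cons a t =>
      rw [pvGo_block j _ [] (by simp) (by simp)]
      simp only [List.nil_append, List.length_nil, Nat.sub_zero, List.take_succ_cons, List.drop_succ_cons]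
      rw [pvChunks]
      congr 1
      exact ih (t.drop j).length (by simp at h ⊢; omega) _ rfl

theorem pvRange_pos_nil (a b s : Int) (hs : 0 < s) (hab : b ≤ a) :
    PySem.List.pyRange a b s = [] := by
  rw [PySem.List.pyRange_of_pos a b hs]
  simp [show ¬ a < b by omega]

theorem pvRange_pos_cons (a b s : Int) (hs : 0 < s) (hab : a < b) :
    PySem.List.pyRange a b s = a :: PySem.List.pyRange (a + s) b s := by
  rw [PySem.List.pyRange_of_pos a b hs, PySem.List.pyRange_of_pos (a+s) b hs]
  have h1 : 0 ≤ (b - a - 1) / s := Int.ediv_nonneg (by omega) (by omega)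
  by_cases h : a + s < b
  · have hn : ((b - a + s - 1) / s).toNat = ((b - (a+s) + s - 1) / s).toNat + 1 := by
      have : b - a + s - 1 = (b - (a+s) + s - 1) + 1 * s := by ring
      rw [this, Int.add_mul_ediv_right _ _ (by omega)]
      have h2 : 0 ≤ (b - (a+s) + s - 1) / s := Int.ediv_nonneg (by omega) (by omega)
      omega
    simp only [if_pos hab, if_pos h, hn, List.range_succ_eq_map, List.map_cons, List.map_map]
    refine List.cons_eq_cons.mpr ⟨by simp, ?_⟩
    apply List.map_congr_left; intro k _
    simp [Function.comp, Nat.succ_eq_add_one]; ring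
  · have hq : (b - a + s - 1) / s = 1 := by
      have h1 : 1 ≤ (b - a + s - 1) / s := by
        rw [Int.le_ediv_iff_mul_le hs]; omega
      have h2 : (b - a + s - 1) / s < 2 := by
        rw [Int.ediv_lt_iff_lt_mul hs]; omega
      omega
    simp [if_pos hab, show ¬ a + s < b by omega, hq]

theorem pvRange_shift (a b c s : Int) (hs : 0 < s) :
    PySem.List.pyRange (a + c) (b + c) s = (PySem.List.pyRange a b s).map (· + c) := by
  rw [PySem.List.pyRange_of_pos _ _ hs, PySem.List.pyRange_of_pos _ _ hs]
  have : b + c - (a + c) = b - a := by ring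
  rw [this]
  simp only [show (a + c < b + c) ↔ (a < b) by omega, List.map_map]
  apply List.map_congr_left; intro k _; simp; ring

theorem pvSlices_eq_chunks (j : Nat) :
    ∀ (L : List (List Int)),
      (PySem.List.pyRange 0 (L.length : Int) ((j + 1 : Nat) : Int)).map
        (fun i => PySem.List.slice L (some i) (some (i + ((j + 1 : Nat) : Int))))
      = pvChunks j L := by
  intro L
  induction h : L.length using Nat.strong_induction_on generalizing L with
  | _ n ih =>
  subst h
  have hs : (0:Int) < ((j + 1 : Nat) : Int) := by positivity
  cases L with
  | nil => rw [pvRange_pos_nil _ _ _ hs (by simp)]; simp [pvChunks]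
  | cons a t =>
    rw [pvRange_pos_cons _ _ _ hs (by exact_mod_cast t.length.succ_pos), List.map_cons, pvChunks]
    have hshift := pvRange_shift 0 (((a::t).length : Int) - ((j+1:Nat):Int)) ((j+1:Nat):Int) _ hs
    rw [show (0:Int) + ((j+1:Nat):Int) = ((j+1:Nat):Int) from by ring,
        show (((a::t).length : Int) - ((j+1:Nat):Int)) + ((j+1:Nat):Int) = ((a::t).length : Int) from by ring] at hshift
    congr 1
    · rw [show (0:Int) + ((j+1:Nat):Int) = ((j+1:Nat):Int) from by ring,
          PySem.List.slice_zero_start, PySem.List.slice_to _ (le_of_lt hs)]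
      simp
    · rw [show (0:Int) + ((j+1:Nat):Int) = ((j+1:Nat):Int) from by ring, hshift, List.map_map]
      by_cases hj : j ≤ t.length
      · have hlen : (((a::t).length : Int) - ((j+1:Nat):Int)) = (((t.drop j).length : Nat) : Int) := by
          simp only [List.length_drop, List.length_cons]; omega
        rw [hlen, ← ih (t.drop j).length (by simp only [List.length_drop, List.length_cons]; omega) _ rfl]
        apply List.map_congr_left
        intro x hx
        obtain ⟨hx0, -, -⟩ := (PySem.List.mem_pyRange_iff_of_pos hs x).mp hx
        obtain ⟨u, rfl⟩ : ∃ u : Nat, x = (u : Int) := ⟨x.toNat, (Int.toNat_of_nonneg hx0).symm⟩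
        simp only [Function.comp_apply]
        rw [show ((u:Int) + ((j+1:Nat):Int)) = (((u + (j+1)) : Nat) : Int) from by push_cast; ring]
        rw [PySem.List.slice_natCast_add, PySem.List.slice_natCast, List.drop_drop]
        rw [show u + (j + 1) - u = j + 1 from by omega,
            show u + (j + 1) = (j + u) + 1 from by omega, List.drop_succ_cons]
      · rw [pvRange_pos_nil _ _ _ hs (by simp only [List.length_cons]; omega)]
        rw [List.drop_eq_nil_of_le (by omega)]
        simp [pvChunks]

-- ===== VERDICT (by name: the statement is the Claim_ definition above) =====
theorem create_operation_data_spec : Claim_equal_create_operation_data := by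
  intro md pd m _ hPre
  obtain ⟨hlen, hm1⟩ := hPre
  have hm : m ≠ 0 := by omega
  obtain ⟨j, hj⟩ : ∃ j, m.natAbs = j + 1 := ⟨m.natAbs - 1, by have := Int.natAbs_pos.mpr hm; omega⟩
  unfold Spec_create_operation_data create_operation_data create_operation_data_alt
  simp only []
  have h1 := pvFoldl_eq_loopA m (fun i => [PySem.List.pyGetD md i 0, PySem.List.pyGetD pd i 0]) md.length 0 ([], [])
  simp only [Nat.zero_add, Nat.cast_zero] at h1
  rw [h1]
  have h2 := pvLoopA_eq_go m hm ((PySem.List.pyRange 0 (md.length : Int) 1).map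
    (fun i => [PySem.List.pyGetD md i 0, PySem.List.pyGetD pd i 0])) 0 [] []
    (by simpa using Int.natAbs_pos.mpr hm) (by simp)
  simp only [] at h2
  rw [h2, List.nil_append, hj, pvGo_eq_chunks]
  rw [show m = ((j + 1 : Nat) : Int) from by
    rw [← hj]; exact (Int.natAbs_of_nonneg (by omega)).symm]
  rw [pvSlices_eq_chunks]
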